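-- pv_equiv track=rewrite | github.com/salim0986/GraphBug---AI-Service | src/review_validator.py | _quote_exists_in_diffs
-- ===== SOURCE A (Python) =====
-- from typing import Dict, List, Tuple, Any
--
-- def _quote_exists_in_diffs(
--
--     quote: str,
--     files_with_diffs: List[Dict[str, Any]]
-- ) -> bool:
--     """Check if quoted code appears in any diff"""
--     # Normalize whitespace for comparison
--     normalized_quote = " ".join(quote.split())
--
--     # Ignore very short quotes (too generic)
--     if len(normalized_quote) < 20:
--         return True  # Don't flag short quotes as invalid
--
--     for file_obj in files_with_diffs:
--         patch = file_obj.get("patch", "")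
--         if not patch:
--             continue
--
--         normalized_patch = " ".join(patch.split())
--
--         # Check if quote appears in patch (fuzzy match with 80% threshold)
--         if normalized_quote in normalized_patch:
--             return True
--
--         # Try substring match for longer quotes
--         if len(normalized_quote) > 50:
--             # Check if significant portion of quote exists
--             words = normalized_quote.split()
--             if len(words) > 5:
--                 # Check if at least 70% of words appear in sequence
--                 chunk_size = max(4, len(words) // 2)
--                 for i in range(len(words) - chunk_size):
--                     chunk = " ".join(words[i:i+chunk_size])
--                     if chunk in normalized_patch:
--                         return True
--
--     return False
-- ===== SOURCE B (Python) =====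
-- from typing import Dict, List, Any
--
-- def _quote_exists_in_diffs(
--     quote: str,
--     files_with_diffs: List[Dict[str, Any]]
-- ) -> bool:
--     """Check if quoted code appears in any diff (single joined haystack)."""
--     normalized_quote = " ".join(quote.split())
--     if len(normalized_quote) < 20:
--         return True
--     # Build the candidate substrings once (quote + its word-chunks).
--     candidates = [normalized_quote]
--     if len(normalized_quote) > 50:
--         words = normalized_quote.split()
--         if len(words) > 5:
--             chunk_size = max(4, len(words) // 2)
--             candidates += [" ".join(words[i:i + chunk_size])
--                            for i in range(len(words) - chunk_size)]
--     # Join all normalized patches into ONE haystack, separated by '\n'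
--     # (normalized text never contains '\n'), and search each candidate once.
--     big = "\n".join(" ".join(f.get("patch", "").split())
--                     for f in files_with_diffs)
--     return any(c in big for c in candidates)
-- ===== Notes on version B (the rewrite author's own statement) =====
-- stated objective: alternative
-- what changed: B builds the candidate set (quote + word-chunks) once instead of per file, joins all normalized patches into a single newline-separated haystack, and searches each candidate once in it, replacing A's per-file early-return loops.
import Mathlib
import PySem

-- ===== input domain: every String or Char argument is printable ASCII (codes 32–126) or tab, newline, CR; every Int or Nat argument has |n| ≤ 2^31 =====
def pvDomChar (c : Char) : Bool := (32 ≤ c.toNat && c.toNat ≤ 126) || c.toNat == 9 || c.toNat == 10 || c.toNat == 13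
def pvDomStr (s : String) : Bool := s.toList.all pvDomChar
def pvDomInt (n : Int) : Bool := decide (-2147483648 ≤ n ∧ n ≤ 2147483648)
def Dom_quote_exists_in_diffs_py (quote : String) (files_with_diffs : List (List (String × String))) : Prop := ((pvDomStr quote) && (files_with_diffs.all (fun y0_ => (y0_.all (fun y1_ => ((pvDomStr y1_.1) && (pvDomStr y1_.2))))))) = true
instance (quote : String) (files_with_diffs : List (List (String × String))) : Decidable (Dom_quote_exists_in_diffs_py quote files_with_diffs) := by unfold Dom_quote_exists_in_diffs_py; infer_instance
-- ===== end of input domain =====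

-- ===== PORT A =====
-- B normalizes/chunks the quote once and searches one joined haystack instead of per-file loops (objective: alternative).
-- shared transliteration of `" ".join(s.split())` (used verbatim by both A and B)
def pvNorm (s : String) : String := PySem.Str.join " " (PySem.Str.split₀ s)

-- A's per-file check: `normalized_quote in normalized_patch` then the chunk loop
def pvAFileHit (nq : String) (np : String) : Bool :=
  if PySem.Str.isIn nq np then true
  else if PySem.Str.len nq > 50 then
    let words := PySem.Str.split₀ nq
    if (words.length : Int) > 5 then
      let chunkSize : Int := max 4 (PySem.Int.floordiv (words.length : Int) 2)
      (PySem.List.pyRange 0 ((words.length : Int) - chunkSize) 1).any (fun i =>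
        PySem.Str.isIn (PySem.Str.join " " (PySem.List.slice words (some i) (some (i + chunkSize)))) np)
    else false
  else false

-- A's `for file_obj in files_with_diffs:` loop with its early returns
def pvALoop (nq : String) (files : List (List (String × String))) : Bool :=
  match files with
  | [] => false
  | f :: rest =>
      let patch := PySem.Dict.getD (PySem.Dict.mk f) "patch" ""
      if patch == "" then pvALoop nq rest
      else if pvAFileHit nq (pvNorm patch) then true
      else pvALoop nq rest

def quote_exists_in_diffs_py (quote : String) (files_with_diffs : List (List (String × String))) : Bool :=
  let nq := pvNorm quote
  if PySem.Str.len nq < 20 then true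
  else pvALoop nq files_with_diffs

-- ===== PORT B =====
-- the candidate list built once: the normalized quote plus its word-chunks
def pvBCandidates (nq : String) : List String :=
  nq ::
    (if PySem.Str.len nq > 50 then
      let words := PySem.Str.split₀ nq
      if (words.length : Int) > 5 then
        let chunkSize : Int := max 4 (PySem.Int.floordiv (words.length : Int) 2)
        (PySem.List.pyRange 0 ((words.length : Int) - chunkSize) 1).map (fun i =>
          PySem.Str.join " " (PySem.List.slice words (some i) (some (i + chunkSize))))
      else []
    else [])

def quote_exists_in_diffs_py_alt (quote : String) (files_with_diffs : List (List (String × String))) : Bool :=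
  let nq := pvNorm quote
  if PySem.Str.len nq < 20 then true
  else
    let big := PySem.Str.join "\n" (files_with_diffs.map (fun f =>
      pvNorm (PySem.Dict.getD (PySem.Dict.mk f) "patch" "")))
    (pvBCandidates nq).any (fun c => PySem.Str.isIn c big)

-- ===== PRECONDITION & SPEC =====
def Spec_quote_exists_in_diffs_py (quote : String) (files_with_diffs : List (List (String × String))) (out : Bool) : Prop := out = quote_exists_in_diffs_py_alt quote files_with_diffs
instance (quote : String) (files_with_diffs : List (List (String × String))) (out : Bool) : Decidable (Spec_quote_exists_in_diffs_py quote files_with_diffs out) := by unfold Spec_quote_exists_in_diffs_py; infer_instance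

-- ===== CLAIM (what is proved, stated in full; the proofs are below) =====
def Claim_equal_quote_exists_in_diffs_py : Prop := ∀ (quote : String) (files_with_diffs : List (List (String × String))), Dom_quote_exists_in_diffs_py quote files_with_diffs → Spec_quote_exists_in_diffs_py quote files_with_diffs (quote_exists_in_diffs_py quote files_with_diffs)

-- ===== LEMMAS AND PROOFS =====

theorem pv_split₀_go_pieces (s cur : List Char) (acc : List (List Char))
    (hcur : ∀ c ∈ cur, PySem.Chars.isspace c = false)
    (hacc : ∀ p ∈ acc, p ≠ [] ∧ ∀ c ∈ p, PySem.Chars.isspace c = false) :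
    ∀ p ∈ PySem.Chars.split₀.go s cur acc, p ≠ [] ∧ ∀ c ∈ p, PySem.Chars.isspace c = false := by
  induction s generalizing cur acc with
  | nil =>
    rw [PySem.Chars.split₀.go]
    split
    · simpa using hacc
    · rename_i hcurne
      intro p hp
      simp only [List.mem_reverse, List.mem_cons] at hp
      rcases hp with h | h
      · subst h
        constructor
        · simpa using fun h => hcurne (by simp [h])
        · intro c hc; exact hcur c (by simpa using hc)
      · exact hacc p h
  | cons c rest ih =>
    rw [PySem.Chars.split₀.go]
    split
    · split
      · exact ih [] acc (by simp) hacc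
      · rename_i hsp hcurne
        refine ih [] _ (by simp) ?_
        intro p hp
        rcases List.mem_cons.mp hp with h | h
        · subst h
          exact ⟨by simpa using fun h => hcurne (by simp [h]),
                 fun d hd => hcur d (by simpa using hd)⟩
        · exact hacc p h
    · rename_i hsp
      refine ih (c :: cur) acc ?_ hacc
      intro d hd
      rcases List.mem_cons.mp hd with h | h
      · subst h; simpa using hsp
      · exact hcur d h


theorem pv_split₀_pieces (cs : List Char) :
    ∀ p ∈ PySem.Chars.split₀ cs, p ≠ [] ∧ ∀ c ∈ p, PySem.Chars.isspace c = false := by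
  intro p hp
  exact pv_split₀_go_pieces cs [] [] (by simp) (by simp) p hp

theorem pv_not_mem_join (sep : Char) (parts : List (List Char)) (c : Char)
    (hsep : c ≠ sep) (hparts : ∀ p ∈ parts, c ∉ p) :
    c ∉ PySem.Chars.join [sep] parts := by
  induction parts with
  | nil => simp [PySem.Chars.join_nil]
  | cons p rest ih =>
    match rest with
    | [] => simpa [PySem.Chars.join_singleton] using hparts p (by simp)
    | q :: rest' =>
      rw [PySem.Chars.join_cons_cons]
      intro hm
      simp only [List.append_assoc, List.mem_append, List.mem_cons, List.not_mem_nil, or_false] at hm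
      rcases hm with h | h | h
      · exact hparts p (by simp) h
      · exact hsep h
      · exact ih (fun r hr => hparts r (List.mem_cons_of_mem _ hr)) h
theorem pv_join_ne_nil (sep : List Char) (p : List Char) (parts : List (List Char))
    (hp : p ≠ []) : PySem.Chars.join sep (p :: parts) ≠ [] := by
  match parts with
  | [] => simpa [PySem.Chars.join_singleton] using hp
  | q :: rest =>
    rw [PySem.Chars.join_cons_cons]
    simp [hp]
theorem pv_prefix_split (sub a b : List Char) (c : Char) (hc : c ∉ sub)
    (h : sub <+: a ++ c :: b) : sub <+: a := by
  by_cases hl : sub.length ≤ a.length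
  · have hs := List.prefix_iff_eq_take.mp h
    rw [List.take_append_of_le_length hl] at hs
    rw [hs]
    exact List.take_prefix _ _
  · exfalso
    rw [not_le] at hl
    have hget := h.getElem (i := a.length) hl
    have : (a ++ c :: b)[a.length]'(by simp) = c := by
      rw [List.getElem_append_right (le_refl _)]
      simp
    have hcc : sub[a.length]'hl = c := hget.trans this
    exact hc (hcc ▸ List.getElem_mem hl)
theorem pv_infix_split (sub a b : List Char) (c : Char) (hc : c ∉ sub)
    (h : sub <:+: a ++ c :: b) : sub <:+: a ∨ sub <:+: b := by
  induction a with
  | nil =>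
    rcases List.infix_cons_iff.mp h with h1 | h1
    · left
      have h2 := pv_prefix_split sub [] b c hc h1
      simp only [List.prefix_nil] at h2
      simp [h2]
    · right; exact h1
  | cons x a' ih =>
    rcases List.infix_cons_iff.mp (by simpa using h) with h1 | h1
    · exact Or.inl (pv_prefix_split sub (x :: a') b c hc h1).isInfix
    · rcases ih h1 with h2 | h2
      · exact Or.inl (h2.trans (List.suffix_cons x a').isInfix)
      · exact Or.inr h2
theorem pv_infix_join_of_mem (sub : List Char) (sep : List Char) (parts : List (List Char))
    (p : List Char) (hp : p ∈ parts) (h : sub <:+: p) : sub <:+: PySem.Chars.join sep parts := by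
  induction parts with
  | nil => simp at hp
  | cons q rest ih =>
    match rest with
    | [] =>
      rw [PySem.Chars.join_singleton]
      rcases List.mem_singleton.mp hp with rfl
      exact h
    | r :: rest' =>
      rw [PySem.Chars.join_cons_cons, List.append_assoc]
      rcases List.mem_cons.mp hp with rfl | hp'
      · exact h.trans ((List.prefix_append _ _).isInfix)
      · exact (ih hp').trans (((List.suffix_append sep _).trans (List.suffix_append q _)).isInfix)
theorem pv_isIn_join (sub : List Char) (parts : List (List Char))
    (hne : sub ≠ []) (hsub : '\n' ∉ sub) (hparts : ∀ p ∈ parts, '\n' ∉ p) :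
    PySem.Chars.isIn sub (PySem.Chars.join ['\n'] parts) = parts.any (fun p => PySem.Chars.isIn sub p) := by
  rw [Bool.eq_iff_iff]
  simp only [List.any_eq_true, PySem.Chars.isIn_iff_infix]
  constructor
  · intro h
    induction parts with
    | nil =>
      rw [PySem.Chars.join_nil] at h
      exact absurd (List.infix_nil.mp h) hne
    | cons p rest ih =>
      match rest with
      | [] =>
        rw [PySem.Chars.join_singleton] at h
        exact ⟨p, by simp, h⟩
      | q :: rest' =>
        rw [PySem.Chars.join_cons_cons, List.append_assoc, List.singleton_append] at h
        rcases pv_infix_split sub p _ '\n' hsub h with h1 | h1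
        · exact ⟨p, by simp, h1⟩
        · rcases ih (fun r hr => hparts r (List.mem_cons_of_mem _ hr)) h1 with ⟨r, hr, h2⟩
          exact ⟨r, List.mem_cons_of_mem _ hr, h2⟩
  · rintro ⟨p, hp, h⟩
    exact pv_infix_join_of_mem sub ['\n'] parts p hp h
theorem pv_norm_toList (s : String) :
    (pvNorm s).toList = PySem.Chars.join [' '] (PySem.Chars.split₀ s.toList) := by
  simp [pvNorm, PySem.Str.join, PySem.Str.split₀, Function.comp_def]
theorem pv_norm_no_newline (s : String) : '\n' ∉ (pvNorm s).toList := by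
  rw [pv_norm_toList]
  apply pv_not_mem_join _ _ _ (by decide)
  intro p hp hm
  have := (pv_split₀_pieces s.toList p hp).2 '\n' hm
  simp [PySem.Chars.isspace] at this
-- every candidate is nonempty and newline-free
theorem pv_candidates_ok (q : String) (hlen : ¬ PySem.Str.len (pvNorm q) < 20) :
    ∀ c ∈ pvBCandidates (pvNorm q), c.toList ≠ [] ∧ '\n' ∉ c.toList := by
  intro c hc
  rcases List.mem_cons.mp hc with rfl | hc
  · refine ⟨?_, pv_norm_no_newline q⟩
    intro h
    rw [PySem.Str.len] at hlen
    simp [h] at hlen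
  · -- c is a chunk
    simp only [pvBCandidates] at hc
    split at hc
    · split at hc
      · rename_i hw
        rcases List.mem_map.mp hc with ⟨i, hi, rfl⟩
        set words := PySem.Str.split₀ (pvNorm q) with hwords
        set cs : Int := max 4 (PySem.Int.floordiv (words.length : Int) 2) with hcs
        rw [PySem.List.mem_pyRange_one] at hi
        have hcs4 : (4:Int) ≤ cs := le_max_left _ _
        have h0i : 0 ≤ i := hi.1
        have hiL : i + cs ≤ (words.length : Int) := by omega
        have hslice := PySem.List.slice_toNat words (a := i) (b := i + cs) h0i (by omega)
        have hlen2 : (words.drop i.toNat).length = words.length - i.toNat := by simp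
        have hne : PySem.List.slice words (some i) (some (i + cs)) ≠ [] := by
          rw [hslice]
          intro h
          have := congrArg List.length h
          simp only [List.length_take, List.length_drop, List.length_nil] at this
          omega
        obtain ⟨p, rest, hpr⟩ := List.exists_cons_of_ne_nil hne
        have hmem : ∀ w ∈ PySem.List.slice words (some i) (some (i + cs)), w ∈ words := by
          intro w hw'; exact PySem.List.mem_of_mem_slice words _ _ hw'
        -- words are pieces of split₀ of pvNorm q
        have hpieces : ∀ w ∈ words, w.toList ≠ [] ∧ ∀ ch ∈ w.toList, PySem.Chars.isspace ch = false := by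
          intro w hw'
          rw [hwords, PySem.Str.split₀] at hw'
          rcases List.mem_map.mp hw' with ⟨l, hl, rfl⟩
          have := pv_split₀_pieces (pvNorm q).toList l hl
          simpa using this
        constructor
        · -- join " " (p :: rest) nonempty
          rw [PySem.Str.join, hpr]
          simp only [String.toList_ofList]
          have : (String.toList p) :: rest.map String.toList ≠ [] ∧ True := ⟨by simp, trivial⟩
          have hp : p.toList ≠ [] := (hpieces p (hmem p (by rw [hpr]; simp))).1
          intro hcontra
          exact pv_join_ne_nil " ".toList p.toList (rest.map String.toList) hp (by simpa using hcontra)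
        · -- no newline in the chunk
          rw [PySem.Str.join]
          simp only [String.toList_ofList]
          apply pv_not_mem_join ' ' _ '\n' (by decide)
          intro pl hpl hm
          rcases List.mem_map.mp hpl with ⟨w, hw', rfl⟩
          have := (hpieces w (hmem w hw')).2 '\n' hm
          simp [PySem.Chars.isspace] at this
      · simp at hc
    · simp at hc
theorem pv_aFileHit_eq (nq np : String) :
    pvAFileHit nq np = (pvBCandidates nq).any (fun c => PySem.Str.isIn c np) := by
  unfold pvAFileHit pvBCandidates
  simp only [List.any_cons]
  cases h1 : PySem.Str.isIn nq np with
  | true => simp [h1]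
  | false =>
    simp only [h1, Bool.false_eq_true, if_false, Bool.false_or]
    split_ifs with h2 h3 <;> simp [List.any_map, Function.comp_def, PySem.Str.isIn, PySem.Str.join]
theorem pv_norm_empty_toList : (pvNorm "").toList = [] := by
  simp [pvNorm, PySem.Str.join, PySem.Str.split₀, PySem.Chars.join_nil, PySem.Chars.split₀, PySem.Chars.split₀.go]
theorem pv_aLoop_eq (nq : String) (files : List (List (String × String)))
    (hcand : ∀ c ∈ pvBCandidates nq, c.toList ≠ []) :
    pvALoop nq files = files.any (fun f =>
      (pvBCandidates nq).any (fun c => PySem.Str.isIn c (pvNorm (PySem.Dict.getD (PySem.Dict.mk f) "patch" "")))) := by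
  induction files with
  | nil => simp [pvALoop]
  | cons f rest ih =>
    rw [pvALoop, List.any_cons]
    split_ifs with hp hhit
    · -- patch empty: the per-file scan is false
      rw [ih]
      have hpe : PySem.Dict.getD (PySem.Dict.mk f) "patch" "" = "" := by
        exact eq_of_beq hp
      rw [hpe]
      have hfalse : (pvBCandidates nq).any (fun c => PySem.Str.isIn c (pvNorm "")) = false := by
        rw [List.any_eq_false]
        intro c hc
        have : PySem.Chars.isIn c.toList (pvNorm "").toList = false := by
          rw [pv_norm_empty_toList]
          exact (PySem.Chars.isIn_eq_false_iff _ _).mpr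
            (fun hinf => hcand c hc (List.infix_nil.mp hinf))
        simp [PySem.Str.isIn, this]
      rw [hfalse]
      simp
    · rw [pv_aFileHit_eq] at hhit
      rw [hhit]
      simp
    · rw [pv_aFileHit_eq] at hhit
      simp only [Bool.not_eq_true] at hhit
      rw [hhit, Bool.false_or]
      exact ih
theorem pv_big (files : List (List (String × String))) (c : String)
    (hne : c.toList ≠ []) (hsub : '\n' ∉ c.toList) :
    PySem.Str.isIn c (PySem.Str.join "\n" (files.map (fun f =>
        pvNorm (PySem.Dict.getD (PySem.Dict.mk f) "patch" "")))) =
    files.any (fun f => PySem.Str.isIn c (pvNorm (PySem.Dict.getD (PySem.Dict.mk f) "patch" ""))) := by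
  rw [PySem.Str.isIn, PySem.Str.join]
  simp only [String.toList_ofList, List.map_map]
  rw [show "\n".toList = ['\n'] from rfl]
  rw [pv_isIn_join c.toList _ hne hsub (by
    intro p hp
    rcases List.mem_map.mp hp with ⟨f, _, rfl⟩
    exact pv_norm_no_newline _)]
  rw [List.any_map]
  simp [Function.comp_def, PySem.Str.isIn]

-- ===== VERDICT (by name: the statement is the Claim_ definition above) =====
theorem quote_exists_in_diffs_py_spec : Claim_equal_quote_exists_in_diffs_py := by
  intro quote files _
  unfold Spec_quote_exists_in_diffs_py
  simp only [quote_exists_in_diffs_py, quote_exists_in_diffs_py_alt]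
  by_cases hl : PySem.Str.len (pvNorm quote) < 20
  · rw [if_pos hl, if_pos hl]
  · rw [if_neg hl, if_neg hl]
    have hcand := pv_candidates_ok quote hl
    rw [pv_aLoop_eq _ _ (fun c hc => (hcand c hc).1)]
    rw [Bool.eq_iff_iff]
    simp only [List.any_eq_true]
    constructor
    · rintro ⟨f, hf, c, hc, hin⟩
      refine ⟨c, hc, ?_⟩
      rw [pv_big files c (hcand c hc).1 (hcand c hc).2]
      simp only [List.any_eq_true]
      exact ⟨f, hf, hin⟩
    · rintro ⟨c, hc, hin⟩
      rw [pv_big files c (hcand c hc).1 (hcand c hc).2] at hin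
      simp only [List.any_eq_true] at hin
      rcases hin with ⟨f, hf, h⟩
      exact ⟨f, hf, c, hc, h⟩
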